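-- pv_equiv track=rewrite | github.com/harrylloyd-bl/pyz3950_refactor | z3950/PyZ3950/asn1.py | read_base128
-- ===== SOURCE A (Python) =====
-- def read_base128(buf, start):
--     val = 0
--     while 1:
--         b = buf[start]
--         start += 1
--         val = val * 128 + (b & 0x7F)
--         if b & 0x80 == 0:
--             break
--     return start, val
-- ===== SOURCE B (Python) =====
-- def read_base128(buf, start):
--     # Locate the terminator byte first, then sum the 7-bit groups
--     # back-to-front with explicit positional weights.
--     end = start
--     while buf[end] & 0x80:
--         end += 1
--     val = 0
--     w = 1
--     for k in range(end, start - 1, -1):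
--         val += (buf[k] & 0x7F) * w
--         w *= 128
--     return end + 1, val
-- ===== Notes on version B (the rewrite author's own statement) =====
-- stated objective: alternative
-- what changed: Instead of A's single Horner-style accumulator loop, B first scans only for the terminator byte, then walks the group back-to-front summing each 7-bit chunk times an explicit positional weight (little-endian weighted sum vs big-endian Horner fold).
import Mathlib
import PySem

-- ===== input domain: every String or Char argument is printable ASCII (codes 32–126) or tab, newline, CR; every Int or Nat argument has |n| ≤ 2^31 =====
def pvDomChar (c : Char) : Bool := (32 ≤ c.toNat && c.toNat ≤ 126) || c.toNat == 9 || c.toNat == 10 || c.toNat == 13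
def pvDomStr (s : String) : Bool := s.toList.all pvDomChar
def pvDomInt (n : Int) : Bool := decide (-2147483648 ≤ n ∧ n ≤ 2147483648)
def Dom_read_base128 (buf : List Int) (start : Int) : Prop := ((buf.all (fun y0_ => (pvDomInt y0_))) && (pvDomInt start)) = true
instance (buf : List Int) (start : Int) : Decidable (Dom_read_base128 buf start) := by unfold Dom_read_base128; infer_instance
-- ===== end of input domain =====

-- B scans for the terminator first, then sums the 7-bit groups back-to-front with
-- positional weights; A's Horner accumulator loop returns the same (start, val).
-- Pre_ excludes exactly the inputs on which the Python raises IndexError (no terminator reached).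


-- ===== PORT A =====
-- A's while loop: fuel-bounded recursion (fuel only makes the loop total; 2*len+1 exceeds
-- the maximal number of iterations Python can perform before raising, so inside Pre_ the
-- fuel never runs out). pyGet? = buf[start] (negative-index wraparound, none = IndexError).
def readLoopA (buf : List Int) : Nat → Int → Int → Int × Int
  | 0, start, val => (start, val)
  | fuel + 1, start, val =>
    match PySem.List.pyGet? buf start with
    | none => (start, val)  -- IndexError in Python; unreachable under Pre_
    | some b =>
      let start' := start + 1
      let val' := val * 128 + PySem.Int.band b 127
      if PySem.Int.band b 128 = 0 then (start', val')
      else readLoopA buf fuel start' val'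

def read_base128 (buf : List Int) (start : Int) : Int × Int :=
  readLoopA buf (2 * buf.length + 1) start 0

-- ===== PORT B =====
-- B's first loop: advance `end` until the byte with bit 0x80 clear (the terminator).
def findEndB (buf : List Int) : Nat → Int → Int
  | 0, e => e
  | fuel + 1, e =>
    match PySem.List.pyGet? buf e with
    | none => e  -- IndexError in Python; unreachable under Pre_
    | some b => if PySem.Int.band b 128 = 0 then e else findEndB buf fuel (e + 1)

-- B's second loop: for k in range(end, start-1, -1): val += (buf[k] & 0x7F) * w; w *= 128
def read_base128_alt (buf : List Int) (start : Int) : Int × Int :=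
  let e := findEndB buf (2 * buf.length + 1) start
  let r := (PySem.List.pyRange e (start - 1) (-1)).foldl
      (fun (p : Int × Int) k =>
        (p.1 + PySem.Int.band ((PySem.List.pyGet? buf k).getD 0) 127 * p.2, p.2 * 128))
      (0, 1)
  (e + 1, r.1)

-- ===== PRECONDITION & SPEC =====
-- Exactly the inputs on which Python A returns: the index chain start, start+1, … stays in
-- range (Python's negative indices count from the end) and reaches a byte with bit 0x80 clear.
def Pre_read_base128 (buf : List Int) (start : Int) : Prop :=
  -(buf.length : Int) ≤ start ∧
    ∃ k : Nat, k < 2 * buf.length ∧ start + (k : Int) < buf.length ∧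
      PySem.Int.band ((PySem.List.pyGet? buf (start + (k : Int))).getD 0) 128 = 0
instance (buf : List Int) (start : Int) : Decidable (Pre_read_base128 buf start) := by
  unfold Pre_read_base128; infer_instance

def pvWitness_read_base128 : List Int × Int := ([130, 5], 0)

def Spec_read_base128 (buf : List Int) (start : Int) (out : Int × Int) : Prop := out = read_base128_alt buf start
instance (buf : List Int) (start : Int) (out : Int × Int) : Decidable (Spec_read_base128 buf start out) := by unfold Spec_read_base128; infer_instance

-- ===== CLAIM (what is proved, stated in full; the proofs are below) =====
def Claim_equal_read_base128 : Prop := ∀ (buf : List Int) (start : Int), Dom_read_base128 buf start → Pre_read_base128 buf start → Spec_read_base128 buf start (read_base128 buf start)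

-- ===== LEMMAS AND PROOFS =====

-- invariant "the loop still reaches a terminator within the remaining fuel"
def GoodB (buf : List Int) (fuel : Nat) (start : Int) : Prop :=
  ∃ k : Nat, k < fuel ∧ -(buf.length : Int) ≤ start ∧ start + (k : Int) < (buf.length : Int) ∧
    PySem.Int.band ((PySem.List.pyGet? buf (start + (k : Int))).getD 0) 128 = 0

-- abbreviations for B's second loop
def stepB (buf : List Int) (p : Int × Int) (k : Int) : Int × Int :=
  (p.1 + PySem.Int.band ((PySem.List.pyGet? buf k).getD 0) 127 * p.2, p.2 * 128)

def sumB (buf : List Int) (s e : Int) : Int × Int :=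
  (PySem.List.pyRange e (s - 1) (-1)).foldl (stepB buf) (0, 1)

theorem foldl_stepB_snd (buf : List Int) (l : List Int) :
    ∀ p : Int × Int, (l.foldl (stepB buf) p).2 = p.2 * 128 ^ l.length := by
  induction l with
  | nil => intro p; simp
  | cons x xs ih =>
    intro p
    simp [List.foldl, ih, stepB, pow_succ]
    ring

theorem goodB_get_some (buf : List Int) (fuel : Nat) (start : Int)
    (h : GoodB buf fuel start) : ∃ b, PySem.List.pyGet? buf start = some b := by
  obtain ⟨k, _, h1, h2, _⟩ := h
  cases hg : PySem.List.pyGet? buf start with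
  | some b => exact ⟨b, rfl⟩
  | none =>
    rw [PySem.List.pyGet?_eq_none_iff] at hg
    exact absurd (by constructor <;> omega : PySem.Raise.InRange buf.length start) hg

theorem goodB_step (buf : List Int) (fuel : Nat) (start : Int) (b : Int)
    (h : GoodB buf (fuel + 1) start)
    (hget : PySem.List.pyGet? buf start = some b)
    (hb : ¬ PySem.Int.band b 128 = 0) : GoodB buf fuel (start + 1) := by
  obtain ⟨k, hk, h1, h2, h3⟩ := h
  have hk0 : k ≠ 0 := by
    rintro rfl
    simp [hget] at h3
    exact hb h3
  refine ⟨k - 1, by omega, by omega, by omega, ?_⟩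
  have : start + 1 + ((k - 1 : Nat) : Int) = start + (k : Int) := by omega
  rw [this]; exact h3

theorem findEndB_ge (buf : List Int) :
    ∀ (fuel : Nat) (start : Int), GoodB buf fuel start → start ≤ findEndB buf fuel start := by
  intro fuel
  induction fuel with
  | zero => intro start ⟨k, hk, _⟩; omega
  | succ n ih =>
    intro start h
    obtain ⟨b, hget⟩ := goodB_get_some buf _ _ h
    by_cases hb : PySem.Int.band b 128 = 0
    · simp [findEndB, hget, hb]
    · have := ih (start + 1) (goodB_step buf n start b h hget hb)
      simp only [findEndB, hget]
      rw [if_neg hb]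
      omega

-- splitting the countdown range at its last element s (when s ≤ e)
theorem sumB_split (buf : List Int) (s e : Int) (h : s ≤ e) :
    sumB buf s e =
      stepB buf ((PySem.List.pyRange e s (-1)).foldl (stepB buf) (0, 1)) s := by
  unfold sumB
  have h1 : PySem.List.pyRange e (s - 1) (-1) = (PySem.List.pyRange s (e + 1) 1).reverse := by
    rw [PySem.List.pyRange_neg_one_eq_reverse]; norm_num
  have h2 : PySem.List.pyRange s (e + 1) 1 = s :: PySem.List.pyRange (s + 1) (e + 1) 1 :=
    PySem.List.pyRange_one_cons (by omega)
  have h3 : PySem.List.pyRange e s (-1) = (PySem.List.pyRange (s + 1) (e + 1) 1).reverse :=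
    PySem.List.pyRange_neg_one_eq_reverse e s
  rw [h1, h2, h3]
  simp [List.foldl_append]

-- main invariant: A's loop = (terminator index + 1, v·128^(len groups) + B's weighted sum)
theorem readLoopA_eq (buf : List Int) :
    ∀ (fuel : Nat) (start v : Int), GoodB buf fuel start →
      readLoopA buf fuel start v =
        (findEndB buf fuel start + 1,
          v * 128 ^ ((findEndB buf fuel start - start).toNat + 1) +
            (sumB buf start (findEndB buf fuel start)).1) := by
  intro fuel
  induction fuel with
  | zero => intro start v ⟨k, hk, _⟩; omega
  | succ n ih =>
    intro start v h
    obtain ⟨b, hget⟩ := goodB_get_some buf _ _ h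
    by_cases hb : PySem.Int.band b 128 = 0
    · -- terminator immediately: e = start
      simp only [readLoopA, findEndB, hget, if_pos hb]
      have hr : PySem.List.pyRange start (start - 1) (-1) = [start] := by
        rw [PySem.List.pyRange_neg_one_cons (by omega : start - 1 < start),
          PySem.List.pyRange_neg_one_eq_nil (le_refl (start - 1))]
      simp [sumB, hr, stepB, hget]
    · have hgood : GoodB buf n (start + 1) := goodB_step buf n start b h hget hb
      have hge : start + 1 ≤ findEndB buf n (start + 1) := findEndB_ge buf n (start + 1) hgood
      set e := findEndB buf n (start + 1) with he
      have hfe : findEndB buf (n + 1) start = e := by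
        simp only [findEndB, hget]; rw [if_neg hb]
      simp only [readLoopA, hget, if_neg hb]
      rw [ih (start + 1) (v * 128 + PySem.Int.band b 127) hgood, hfe]
      refine Prod.ext rfl ?_
      -- arithmetic: Horner step vs weighted-sum tail
      have hsplit := sumB_split buf start e (by omega)
      have hsnd : ((PySem.List.pyRange e start (-1)).foldl (stepB buf) (0, 1)).2 =
          128 ^ (PySem.List.pyRange e start (-1)).length := by
        rw [foldl_stepB_snd]; ring
      have hlen : (PySem.List.pyRange e start (-1)).length = (e - start).toNat := by
        rw [PySem.List.length_pyRange_neg_one]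
      have hfold : ((PySem.List.pyRange e start (-1)).foldl (stepB buf) (0, 1)).1 =
          (sumB buf (start + 1) e).1 := by
        unfold sumB
        have : PySem.List.pyRange e (start + 1 - 1) (-1) = PySem.List.pyRange e start (-1) := by
          norm_num
        rw [this]
      have htn : (e - start).toNat = (e - (start + 1)).toNat + 1 := by omega
      rw [hsplit]
      simp only [stepB, hget, Option.getD_some, hsnd, hlen, hfold, htn]
      ring

-- ===== VERDICT (by name: the statement is the Claim_ definition above) =====
theorem read_base128_spec : Claim_equal_read_base128 := by
  intro buf start _ hpre
  obtain ⟨h1, k, hk, h2, h3⟩ := hpre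
  have hgood : GoodB buf (2 * buf.length + 1) start := ⟨k, by omega, h1, h2, h3⟩
  unfold Spec_read_base128 read_base128 read_base128_alt
  rw [readLoopA_eq buf _ start 0 hgood]
  simp only [zero_mul, zero_add, sumB]
  rfl
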